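-- pv_equiv track=rewrite | github.com/wumusill/Programmers | Lv1/num_pair.py | solution
-- ===== SOURCE A (Python) =====
-- def solution(X, Y):
--     answer = ''
--     for i in range(9, -1, -1):
--         num = str(i)
--         answer += num * min(X.count(num), Y.count(num))
--     if answer == "":
--         return "-1"
--     return str(int(answer))
-- ===== SOURCE B (Python) =====
-- def solution(X, Y):
--     xs = sorted((c for c in X if c.isdigit()), reverse=True)
--     ys = sorted((c for c in Y if c.isdigit()), reverse=True)
--     out = []
--     i = 0
--     j = 0
--     while i < len(xs) and j < len(ys):
--         if xs[i] == ys[j]: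
--             out.append(xs[i])
--             i += 1
--             j += 1
--         elif xs[i] > ys[j]:
--             i += 1
--         else:
--             j += 1
--     answer = ''.join(out)
--     if answer == "":
--         return "-1"
--     return str(int(answer))
-- ===== Notes on version B (the rewrite author's own statement) =====
-- stated objective: alternative
-- what changed: A scans both strings once per digit in a fixed 9..0 counting loop; B never counts: it sorts each string's digit characters descending and runs a two-pointer merge over the two sorted lists, emitting a character whenever the heads match, then keeps the same ''/int tail.
import Mathlib
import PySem

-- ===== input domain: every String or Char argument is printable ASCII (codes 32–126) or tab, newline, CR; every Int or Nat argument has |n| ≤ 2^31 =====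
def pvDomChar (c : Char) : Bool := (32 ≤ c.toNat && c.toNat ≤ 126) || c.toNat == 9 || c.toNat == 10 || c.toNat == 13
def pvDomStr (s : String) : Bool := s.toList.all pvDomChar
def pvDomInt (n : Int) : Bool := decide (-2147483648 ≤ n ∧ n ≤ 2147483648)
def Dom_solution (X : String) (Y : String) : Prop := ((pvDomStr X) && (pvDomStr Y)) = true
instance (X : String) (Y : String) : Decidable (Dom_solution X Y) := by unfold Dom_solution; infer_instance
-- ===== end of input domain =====

-- B replaces A's ten per-digit counting scans by a different algorithm: sort each string's
-- digit characters descending and two-pointer-merge the two sorted lists, emitting on equal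
-- heads; the ''-guard / int tail is unchanged (objective: alternative).

-- ===== PORT A =====
-- 'answer += num * min(X.count(num), Y.count(num))' : str*int is the char list repeated (pyRepeat).
-- 'str(int(answer))' : at this point answer is a nonempty string of digits, so int() never
-- raises and the .getD 0 default is unreachable.
def solution (X : String) (Y : String) : String :=
  let answer :=
    (PySem.List.pyRange 9 (-1) (-1)).foldl
      (fun answer i =>
        let num := PySem.Int.toStr i
        answer ++ String.ofList (PySem.List.pyRepeat num.toList
          (min ((PySem.Str.count X num : Int)) ((PySem.Str.count Y num : Int)))))
      ""
  if answer = "" then "-1"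
  else PySem.Int.toStr ((PySem.Int.ofStr? answer).getD 0)

-- ===== PORT B =====
-- Source B's while loop: i and j start at 0 and only ever grow, so Nat counters are exact;
-- xs[i] / ys[j] are read under i < len(xs) ∧ j < len(ys), so the getD default is unreachable.
def commonLoop (xs ys : List Char) (i j : Nat) (out : List Char) : List Char :=
  if i < xs.length ∧ j < ys.length then
    let x := xs.getD i ' '
    let y := ys.getD j ' '
    if x = y then commonLoop xs ys (i + 1) (j + 1) (out ++ [x])
    else if y < x then commonLoop xs ys (i + 1) j out
    else commonLoop xs ys i (j + 1) out
  else out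
termination_by (xs.length - i) + (ys.length - j)
decreasing_by all_goals omega

-- sorted((c for c in X if c.isdigit()), reverse=True) ; ''.join(out) over single-char strings.
def solution_alt (X : String) (Y : String) : String :=
  let xs := PySem.List.sorted (X.toList.filter PySem.Chars.isdigit) (fun c => c) true
  let ys := PySem.List.sorted (Y.toList.filter PySem.Chars.isdigit) (fun c => c) true
  let out := commonLoop xs ys 0 0 []
  let answer := PySem.Str.join "" (out.map (fun c => String.ofList [c]))
  if answer = "" then "-1"
  else PySem.Int.toStr ((PySem.Int.ofStr? answer).getD 0)

-- ===== PRECONDITION & SPEC =====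
def Spec_solution (X : String) (Y : String) (out : String) : Prop := out = solution_alt X Y
instance (X : String) (Y : String) (out : String) : Decidable (Spec_solution X Y out) := by unfold Spec_solution; infer_instance

-- ===== CLAIM (what is proved, stated in full; the proofs are below) =====
def Claim_equal_solution : Prop := ∀ (X : String) (Y : String), Dom_solution X Y → Spec_solution X Y (solution X Y)

-- ===== LEMMAS AND PROOFS =====

-- digits of X (resp. Y), in order
def pvDX (s : String) : List Char := s.toList.filter PySem.Chars.isdigit

-- min of the two per-digit counts
def pvM (X Y : String) (c : Char) : Nat := min (X.toList.count c) (Y.toList.count c)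

def pvDigits : List Char := ['9', '8', '7', '6', '5', '4', '3', '2', '1', '0']

-- the common character list, descending — what A's loop writes
def pvLA (X Y : String) : List Char := pvDigits.flatMap (fun c => List.replicate (pvM X Y c) c)

-- A's answer expression, let-free (defeq to the let-chain in `solution`)
def pvAnsA (X Y : String) : String :=
  (PySem.List.pyRange 9 (-1) (-1)).foldl
    (fun answer i =>
      answer ++ String.ofList (PySem.List.pyRepeat (PySem.Int.toStr i).toList
        (min ((PySem.Str.count X (PySem.Int.toStr i) : Int)) ((PySem.Str.count Y (PySem.Int.toStr i) : Int)))))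
    ""

-- B's sorted digit list and answer expression (defeq to the let-chain in `solution_alt`)
def pvSD (s : String) : List Char :=
  PySem.List.sorted (s.toList.filter PySem.Chars.isdigit) (fun c => c) true

def pvAnsB (X Y : String) : String :=
  PySem.Str.join ""
    ((commonLoop (pvSD X) (pvSD Y) 0 0 []).map (fun c => String.ofList [c]))

-- structural two-pointer merge: what commonLoop computes on the suffixes
def pvInter : List Char → List Char → List Char
  | [], _ => []
  | _ :: _, [] => []
  | x :: xs, y :: ys =>
    if x = y then x :: pvInter xs ys
    else if y < x then pvInter xs (y :: ys)
    else pvInter (x :: xs) ys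

lemma pvStrExt (s t : String) (h : s.toList = t.toList) : s = t := by
  have hs : String.ofList s.toList = s := by simp
  have ht : String.ofList t.toList = t := by simp
  rw [← hs, ← ht, h]

lemma pvMinCast (a b : Nat) : (min (a : Int) (b : Int)).toNat = min a b := by omega

lemma pvCountGo (c : Char) : ∀ (fuel : Nat) (l : List Char) (acc : Nat), l.length ≤ fuel →
    PySem.Chars.count.go [c] fuel l acc = acc + l.count c := by
  intro fuel
  induction fuel with
  | zero =>
    intro l acc h
    cases l with
    | nil => simp [PySem.Chars.count.go]
    | cons hd t => simp at h
  | succ n ih =>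
    intro l acc h
    cases l with
    | nil => simp [PySem.Chars.count.go]
    | cons hd t =>
      have hgo : PySem.Chars.count.go [c] (n + 1) (hd :: t) acc
          = if c == hd then PySem.Chars.count.go [c] n t (acc + 1)
            else PySem.Chars.count.go [c] n t acc := by
        simp [PySem.Chars.count.go, List.isPrefixOf]
      rw [hgo]
      have hlen : t.length ≤ n := by simpa using h
      by_cases hc : c = hd
      · subst hc
        rw [if_pos (by simp), ih t (acc + 1) hlen]
        simp
        omega
      · have hdc : ¬ hd = c := fun hh => hc hh.symm
        rw [if_neg (by simpa using hc), ih t acc hlen]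
        simp [hdc]

lemma pvCountSingleton (s : List Char) (c : Char) : PySem.Chars.count s [c] = s.count c := by
  unfold PySem.Chars.count
  simpa using pvCountGo c s.length s 0 (le_refl _)

lemma pvStrCount (X : String) (i : Int) (c : Char) (h : (PySem.Int.toStr i).toList = [c]) :
    PySem.Str.count X (PySem.Int.toStr i) = X.toList.count c := by
  unfold PySem.Str.count
  rw [h, pvCountSingleton]

lemma pvBlock (X Y : String) (i : Int) (c : Char) (h : (PySem.Int.toStr i).toList = [c]) :
    PySem.List.pyRepeat (PySem.Int.toStr i).toList
      (min ((PySem.Str.count X (PySem.Int.toStr i) : Int)) ((PySem.Str.count Y (PySem.Int.toStr i) : Int)))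
      = List.replicate (pvM X Y c) c := by
  rw [pvStrCount X i c h, pvStrCount Y i c h, h, PySem.List.pyRepeat_singleton, pvMinCast]
  rfl

lemma pvAnsA_eq (X Y : String) : pvAnsA X Y = String.ofList (pvLA X Y) := by
  unfold pvAnsA
  rw [show PySem.List.pyRange 9 (-1) (-1) = [9, 8, 7, 6, 5, 4, 3, 2, 1, 0] from by decide]
  simp only [List.foldl_cons, List.foldl_nil]
  rw [pvBlock X Y 9 '9' (by decide), pvBlock X Y 8 '8' (by decide),
      pvBlock X Y 7 '7' (by decide), pvBlock X Y 6 '6' (by decide),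
      pvBlock X Y 5 '5' (by decide), pvBlock X Y 4 '4' (by decide),
      pvBlock X Y 3 '3' (by decide), pvBlock X Y 2 '2' (by decide),
      pvBlock X Y 1 '1' (by decide), pvBlock X Y 0 '0' (by decide)]
  apply pvStrExt
  simp [pvLA, pvDigits]

lemma pvMemDigitsOfIsdigit (c : Char) (h : PySem.Chars.isdigit c = true) : c ∈ pvDigits := by
  simp only [PySem.Chars.isdigit, Bool.and_eq_true, decide_eq_true_eq] at h
  obtain ⟨h1, h2⟩ := h
  have l1 : 48 ≤ c.toNat := h1
  have l2 : c.toNat ≤ 57 := h2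
  have hc : Char.ofNat c.toNat = c := Char.ofNat_toNat c
  interval_cases h : c.toNat <;>
    · rw [← hc]; decide

lemma pvIsdigitOfMemDigits (c : Char) (h : c ∈ pvDigits) : PySem.Chars.isdigit c = true := by
  fin_cases h <;> decide

lemma pvCountFlatMapRep (g : Char → Nat) (c : Char) :
    ∀ (S : List Char), S.Nodup →
      ((S.flatMap fun k => List.replicate (g k) k).count c = if c ∈ S then g c else 0) := by
  intro S
  induction S with
  | nil => simp
  | cons d S ih =>
    intro hS
    rcases List.nodup_cons.mp hS with ⟨hd, hS'⟩
    rw [List.flatMap_cons, List.count_append, ih hS']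
    by_cases h : c = d
    · subst h
      simp [hd]
    · have hdc : ¬ d = c := fun hh => h hh.symm
      have h1 : (List.replicate (g d) d).count c = 0 := by
        simp [List.count_replicate, hdc]
      rw [h1]
      simp [List.mem_cons, h]

lemma pvPairwiseFlatMapRep (g : Char → Nat) :
    ∀ (ds : List Char), ds.Pairwise (fun a b => b < a) →
      (ds.flatMap fun k => List.replicate (g k) k).Pairwise (fun a b => b ≤ a) := by
  intro ds
  induction ds with
  | nil => simp
  | cons d ds ih =>
    intro h
    rw [List.flatMap_cons, List.pairwise_append]
    refine ⟨List.pairwise_replicate.mpr (Or.inr le_rfl), ih (List.pairwise_cons.mp h).2, ?_⟩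
    intro a ha b hb
    have ha' : a = d := List.eq_of_mem_replicate ha
    obtain ⟨e, he, hbe⟩ := List.mem_flatMap.mp hb
    have hb' : b = e := List.eq_of_mem_replicate hbe
    rw [ha', hb']
    exact le_of_lt ((List.pairwise_cons.mp h).1 e he)

lemma pvLA_pairwise (X Y : String) : (pvLA X Y).Pairwise (fun a b => b ≤ a) :=
  pvPairwiseFlatMapRep (pvM X Y) pvDigits (by decide)

-- the index loop computes pvInter on the remaining suffixes
lemma pvCommonLoop_eq (xs ys : List Char) :
    ∀ (n i j : Nat) (out : List Char),
      (xs.length - i) + (ys.length - j) ≤ n →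
      commonLoop xs ys i j out = out ++ pvInter (xs.drop i) (ys.drop j) := by
  intro n
  induction n with
  | zero =>
    intro i j out h
    have hi : xs.length ≤ i := by omega
    rw [commonLoop, if_neg (by omega), List.drop_eq_nil_of_le hi]
    simp [pvInter]
  | succ n ih =>
    intro i j out h
    by_cases hc : i < xs.length ∧ j < ys.length
    · obtain ⟨hi, hj⟩ := hc
      have hdx : xs.drop i = xs[i] :: xs.drop (i + 1) := List.drop_eq_getElem_cons hi
      have hdy : ys.drop j = ys[j] :: ys.drop (j + 1) := List.drop_eq_getElem_cons hj
      have hgx : xs.getD i ' ' = xs[i] := List.getD_eq_getElem xs ' ' hi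
      have hgy : ys.getD j ' ' = ys[j] := List.getD_eq_getElem ys ' ' hj
      rw [commonLoop, if_pos ⟨hi, hj⟩]
      simp only [hgx, hgy]
      rw [hdx, hdy, pvInter]
      by_cases hxy : xs[i] = ys[j]
      · rw [if_pos hxy, if_pos hxy, ih (i + 1) (j + 1) (out ++ [xs[i]]) (by omega)]
        simp
      · rw [if_neg hxy, if_neg hxy]
        by_cases hlt : ys[j] < xs[i]
        · rw [if_pos hlt, if_pos hlt, ih (i + 1) j out (by omega), hdy]
        · rw [if_neg hlt, if_neg hlt, ih i (j + 1) out (by omega), hdx]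
    · rw [commonLoop, if_neg hc]
      rcases not_and_or.mp hc with hi | hj
      · rw [List.drop_eq_nil_of_le (by omega)]
        simp [pvInter]
      · rw [show ys.drop j = [] from List.drop_eq_nil_of_le (by omega)]
        cases xs.drop i <;> simp [pvInter]

lemma pvInter_nil_right : ∀ (xs : List Char), pvInter xs [] = [] := by
  intro xs
  cases xs <;> simp [pvInter]

lemma pvInter_sublist : ∀ (xs ys : List Char), (pvInter xs ys).Sublist xs := by
  intro xs ys
  induction hn : xs.length + ys.length using Nat.strong_induction_on generalizing xs ys with
  | _ n ih =>
    cases xs with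
    | nil => simp [pvInter]
    | cons x xs' =>
      cases ys with
      | nil => simp [pvInter_nil_right]
      | cons y ys' =>
        rw [pvInter]
        by_cases hxy : x = y
        · rw [if_pos hxy]
          exact (ih (xs'.length + ys'.length) (by simp at hn; omega) xs' ys' rfl).cons₂ x
        · rw [if_neg hxy]
          by_cases hlt : y < x
          · rw [if_pos hlt]
            exact (ih (xs'.length + (y :: ys').length) (by simp at hn ⊢; omega) xs' (y :: ys') rfl).cons x
          · rw [if_neg hlt]
            exact ih ((x :: xs').length + ys'.length) (by simp at hn ⊢; omega) (x :: xs') ys' rfl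

lemma pvInter_count :
    ∀ (xs ys : List Char), xs.Pairwise (fun a b => b ≤ a) → ys.Pairwise (fun a b => b ≤ a) →
      ∀ c, (pvInter xs ys).count c = min (xs.count c) (ys.count c) := by
  intro xs ys
  induction hn : xs.length + ys.length using Nat.strong_induction_on generalizing xs ys with
  | _ n ih =>
    intro hx hy c
    cases xs with
    | nil => simp [pvInter]
    | cons x xs' =>
      cases ys with
      | nil => simp [pvInter_nil_right]
      | cons y ys' =>
        rw [pvInter]
        by_cases hxy : x = y
        · subst hxy
          rw [if_pos rfl]
          rw [List.count_cons, List.count_cons, List.count_cons,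
            ih (xs'.length + ys'.length) (by simp at hn; omega) xs' ys' rfl
              (List.pairwise_cons.mp hx).2 (List.pairwise_cons.mp hy).2 c]
          omega
        · rw [if_neg hxy]
          by_cases hlt : y < x
          · rw [if_pos hlt,
              ih (xs'.length + (y :: ys').length) (by simp at hn ⊢; omega) xs' (y :: ys') rfl
                (List.pairwise_cons.mp hx).2 hy c]
            by_cases hcx : c = x
            · subst hcx
              have h0 : (y :: ys').count c = 0 := by
                rw [List.count_eq_zero]
                intro hmem
                rcases List.mem_cons.mp hmem with h | h
                · exact absurd h.symm (fun hh => (lt_irrefl c) (hh ▸ hlt))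
                · exact absurd ((List.pairwise_cons.mp hy).1 c h) (not_le.mpr hlt)
              omega
            · rw [List.count_cons_of_ne (fun h => hcx h.symm)]
          · rw [if_neg hlt,
              ih ((x :: xs').length + ys'.length) (by simp at hn ⊢; omega) (x :: xs') ys' rfl
                hx (List.pairwise_cons.mp hy).2 c]
            have hxlt : x < y := lt_of_le_of_ne (not_lt.mp hlt) hxy
            by_cases hcy : c = y
            · subst hcy
              have h0 : (x :: xs').count c = 0 := by
                rw [List.count_eq_zero]
                intro hmem
                rcases List.mem_cons.mp hmem with h | h
                · exact absurd h.symm (fun hh => (lt_irrefl c) (hh ▸ hxlt))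
                · exact absurd ((List.pairwise_cons.mp hx).1 c h) (not_le.mpr hxlt)
              omega
            · rw [List.count_cons_of_ne (fun h => hcy h.symm)]

lemma pvSD_pairwise (s : String) : (pvSD s).Pairwise (fun a b => b ≤ a) := by
  have := PySem.List.sorted_pairwise_rev (s.toList.filter PySem.Chars.isdigit) (fun c => c)
  simpa [pvSD] using this

lemma pvSD_count (s : String) (c : Char) : (pvSD s).count c = (pvDX s).count c :=
  (PySem.List.sorted_perm (s.toList.filter PySem.Chars.isdigit) (fun c => c) true).count_eq c

lemma pvDX_count (s : String) (c : Char) (h : PySem.Chars.isdigit c = true) :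
    (pvDX s).count c = s.toList.count c := by
  unfold pvDX
  rw [List.count_filter h]

lemma pvDX_count_zero (s : String) (c : Char) (h : PySem.Chars.isdigit c = false) :
    (pvDX s).count c = 0 := by
  rw [List.count_eq_zero]
  intro hmem
  have := List.of_mem_filter hmem
  rw [h] at this
  exact absurd this (by simp)

lemma pvInter_eq_pvLA (X Y : String) : pvInter (pvSD X) (pvSD Y) = pvLA X Y := by
  have hperm : (pvInter (pvSD X) (pvSD Y)).Perm (pvLA X Y) := by
    rw [List.perm_iff_count]
    intro c
    rw [pvInter_count (pvSD X) (pvSD Y) (pvSD_pairwise X) (pvSD_pairwise Y) c,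
      pvSD_count, pvSD_count]
    unfold pvLA
    rw [pvCountFlatMapRep (pvM X Y) c pvDigits (by decide)]
    by_cases hd : PySem.Chars.isdigit c
    · rw [if_pos (pvMemDigitsOfIsdigit c hd), pvDX_count X c hd, pvDX_count Y c hd]
      rfl
    · rw [if_neg (fun hmem => (Bool.eq_false_iff.mp (Bool.of_not_eq_true hd)) (pvIsdigitOfMemDigits c hmem)),
        pvDX_count_zero X c (Bool.of_not_eq_true hd), pvDX_count_zero Y c (Bool.of_not_eq_true hd)]
      simp
  exact hperm.eq_of_pairwise (fun a b _ _ h1 h2 => le_antisymm h2 h1)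
    ((pvSD_pairwise X).sublist (pvInter_sublist (pvSD X) (pvSD Y)))
    (pvLA_pairwise X Y)

lemma pvAnsB_eq (X Y : String) : pvAnsB X Y = String.ofList (pvLA X Y) := by
  unfold pvAnsB
  rw [pvCommonLoop_eq (pvSD X) (pvSD Y) ((pvSD X).length + (pvSD Y).length) 0 0 [] (by omega)]
  simp only [List.drop_zero, List.nil_append]
  rw [pvInter_eq_pvLA]
  apply pvStrExt
  rw [PySem.Str.toList_join]
  simp only [List.map_map]
  have hmap : (String.toList ∘ fun c => String.ofList [c]) = fun c => [c] := by
    funext c; simp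
  rw [hmap, show ("" : String).toList = [] from by decide, PySem.Chars.join_nil_singletons]
  simp

lemma pvMain (X Y : String) : solution X Y = solution_alt X Y := by
  show (if pvAnsA X Y = "" then "-1" else PySem.Int.toStr ((PySem.Int.ofStr? (pvAnsA X Y)).getD 0))
     = (if pvAnsB X Y = "" then "-1" else PySem.Int.toStr ((PySem.Int.ofStr? (pvAnsB X Y)).getD 0))
  rw [pvAnsA_eq, pvAnsB_eq]

-- ===== VERDICT (by name: the statement is the Claim_ definition above) =====
theorem solution_spec : Claim_equal_solution := by
  intro X Y _
  unfold Spec_solution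
  exact pvMain X Y
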